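-- pv_equiv track=rewrite | github.com/HsinTieh/linebot-for-QnA | app.py | checkenable
-- ===== SOURCE A (Python) =====
-- def checkenable(mes):
--   enable=[0,0,0,0,0,0]
--   for m in mes:
--     if len(m)==1:
--       enable[0]=1
--     elif len(m)==2:
--       enable[1]=1
--     elif len(m)==3:
--       enable[2]=1
--     elif len(m)==4:
--       enable[3]=1
--     elif len(m)==5:
--       enable[4]=1
--     else :
--       enable[5]=1
--   return enable
-- ===== SOURCE B (Python) =====
-- def checkenable(mes):
--   lens = [len(m) for m in mes]
--   out = [0 if all(l != k for l in lens) else 1 for k in range(1, 6)]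
--   out.append(0 if all(1 <= l <= 5 for l in lens) else 1)
--   return out
-- ===== Notes on version B (the rewrite author's own statement) =====
-- stated objective: alternative
-- what changed: Inverts the computation from input-driven to output-driven: instead of one pass over the elements mutating a flag array through a six-way if/elif cascade, B builds each of the six output positions directly as an all()-test over the list of lengths (one per bucket).
import Mathlib
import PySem

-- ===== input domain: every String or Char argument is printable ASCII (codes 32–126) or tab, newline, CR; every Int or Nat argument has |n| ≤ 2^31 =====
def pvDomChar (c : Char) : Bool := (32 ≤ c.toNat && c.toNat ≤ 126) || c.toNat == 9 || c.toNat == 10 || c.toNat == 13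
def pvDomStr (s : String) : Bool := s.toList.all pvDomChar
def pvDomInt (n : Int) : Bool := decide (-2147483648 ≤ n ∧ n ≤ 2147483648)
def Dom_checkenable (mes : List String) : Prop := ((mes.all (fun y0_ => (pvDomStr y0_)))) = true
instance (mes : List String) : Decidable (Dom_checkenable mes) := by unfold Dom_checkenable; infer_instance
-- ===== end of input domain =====

-- B inverts the computation: instead of A's single input-driven pass mutating a flag array
-- through a six-way if/elif cascade, B builds each output position directly as an
-- all()-test over the list of lengths (alternative decomposition; same O(n) cost).

-- ===== PORT A =====
def checkenable (mes : List String) : List Int :=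
  mes.foldl (fun enable m =>
    if PySem.Str.len m = 1 then enable.set 0 1
    else if PySem.Str.len m = 2 then enable.set 1 1
    else if PySem.Str.len m = 3 then enable.set 2 1
    else if PySem.Str.len m = 4 then enable.set 3 1
    else if PySem.Str.len m = 5 then enable.set 4 1
    else enable.set 5 1) [0, 0, 0, 0, 0, 0]

-- ===== PORT B =====
def checkenable_alt (mes : List String) : List Int :=
  let lens := mes.map PySem.Str.len
  ((PySem.List.pyRange 1 6 1).map
    (fun k => if lens.all (fun l => decide (l ≠ k)) then (0 : Int) else 1))
  ++ [if lens.all (fun l => decide (1 ≤ l ∧ l ≤ 5)) then (0 : Int) else 1]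

-- ===== PRECONDITION & SPEC =====
def Spec_checkenable (mes : List String) (out : List Int) : Prop := out = checkenable_alt mes
instance (mes : List String) (out : List Int) : Decidable (Spec_checkenable mes out) := by unfold Spec_checkenable; infer_instance

-- ===== CLAIM (what is proved, stated in full; the proofs are below) =====
def Claim_equal_checkenable : Prop := ∀ (mes : List String), Dom_checkenable mes → Spec_checkenable mes (checkenable mes)

-- ===== LEMMAS AND PROOFS =====

-- A's six-way cascade body is pointwise a closed-form bucket write
theorem cascade_body (enable : List Int) (m : String) :
    (if PySem.Str.len m = 1 then enable.set 0 1
     else if PySem.Str.len m = 2 then enable.set 1 1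
     else if PySem.Str.len m = 3 then enable.set 2 1
     else if PySem.Str.len m = 4 then enable.set 3 1
     else if PySem.Str.len m = 5 then enable.set 4 1
     else enable.set 5 1) =
    enable.set (if 1 ≤ PySem.Str.len m ∧ PySem.Str.len m ≤ 5
                then (PySem.Str.len m - 1).toNat else 5) 1 := by
  have h0 : 0 ≤ PySem.Str.len m := by rw [PySem.Str.len_eq]; positivity
  by_cases h1 : PySem.Str.len m = 1
  · rw [if_pos h1, h1]; norm_num
  · by_cases h2 : PySem.Str.len m = 2
    · rw [if_neg h1, if_pos h2, h2]; norm_num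
    · by_cases h3 : PySem.Str.len m = 3
      · rw [if_neg h1, if_neg h2, if_pos h3, h3]; norm_num; rfl
      · by_cases h4 : PySem.Str.len m = 4
        · rw [if_neg h1, if_neg h2, if_neg h3, if_pos h4, h4]; norm_num; rfl
        · by_cases h5 : PySem.Str.len m = 5
          · rw [if_neg h1, if_neg h2, if_neg h3, if_neg h4, if_pos h5, h5]; norm_num; rfl
          · have hb : ¬(1 ≤ PySem.Str.len m ∧ PySem.Str.len m ≤ 5) := by omega
            rw [if_neg h1, if_neg h2, if_neg h3, if_neg h4, if_neg h5, if_neg hb]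

-- closed form of the bucket fold, by induction with a general 6-slot accumulator
theorem bucket_closed (L : List Int) (a b c d e f : Int) :
    L.foldl (fun enable n => enable.set (if 1 ≤ n ∧ n ≤ 5 then (n - 1).toNat else 5) 1)
      [a, b, c, d, e, f] =
    [if L.any (fun n => n = 1) then 1 else a,
     if L.any (fun n => n = 2) then 1 else b,
     if L.any (fun n => n = 3) then 1 else c,
     if L.any (fun n => n = 4) then 1 else d,
     if L.any (fun n => n = 5) then 1 else e,
     if L.any (fun n => ¬(1 ≤ n ∧ n ≤ 5)) then 1 else f] := by
  induction L generalizing a b c d e f with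
  | nil => simp
  | cons n t ih =>
    rw [List.foldl_cons]
    by_cases hb : 1 ≤ n ∧ n ≤ 5
    · obtain ⟨hl, hr⟩ := hb
      have h15 : n = 1 ∨ n = 2 ∨ n = 3 ∨ n = 4 ∨ n = 5 := by omega
      rcases h15 with rfl | rfl | rfl | rfl | rfl
      · show List.foldl _ [1, b, c, d, e, f] t = _
        rw [ih]; simp
      · show List.foldl _ [a, 1, c, d, e, f] t = _
        rw [ih]; simp
      · show List.foldl _ [a, b, 1, d, e, f] t = _
        rw [ih]; simp
      · show List.foldl _ [a, b, c, 1, e, f] t = _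
        rw [ih]; simp
      · show List.foldl _ [a, b, c, d, 1, f] t = _
        rw [ih]; simp
    · have h1 : n ≠ 1 := by omega
      have h2 : n ≠ 2 := by omega
      have h3 : n ≠ 3 := by omega
      have h4 : n ≠ 4 := by omega
      have h5 : n ≠ 5 := by omega
      rw [if_neg hb]
      show List.foldl _ [a, b, c, d, e, 1] t = _
      rw [ih]
      simp [h1, h2, h3, h4, h5, hb]

-- B's "0 unless some length fails the all-test" equals the closed form's any-test
theorem flag_all_any (L : List Int) (p : Int → Prop) [DecidablePred p] :
    (if L.all (fun l => decide (¬ p l)) then (0 : Int) else 1) =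
    (if L.any (fun l => decide (p l)) then (1 : Int) else 0) := by
  rcases h : L.any (fun l => decide (p l)) with _ | _
  · simp only [List.any_eq_false] at h
    have : L.all (fun l => decide (¬ p l)) = true := by
      simp only [List.all_eq_true]
      intro x hx
      simpa using h x hx
    rw [this]; simp
  · simp only [List.any_eq_true] at h
    obtain ⟨x, hx, hp⟩ := h
    have : L.all (fun l => decide (¬ p l)) = false := by
      simp only [List.all_eq_false]
      exact ⟨x, hx, by simpa using hp⟩
    rw [this]; simp

-- ===== VERDICT (by name: the statement is the Claim_ definition above) =====
theorem checkenable_spec : Claim_equal_checkenable := by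
  intro mes _
  show checkenable mes = checkenable_alt mes
  rw [checkenable, checkenable_alt]
  simp only [cascade_body]
  have hclosed := bucket_closed (mes.map PySem.Str.len) 0 0 0 0 0 0
  rw [List.foldl_map] at hclosed
  rw [hclosed]
  have hrange : PySem.List.pyRange 1 6 1 = [1, 2, 3, 4, 5] := by decide
  rw [hrange]
  simp only [List.map_cons, List.map_nil]
  rw [flag_all_any _ (fun l => l = 1), flag_all_any _ (fun l => l = 2),
      flag_all_any _ (fun l => l = 3), flag_all_any _ (fun l => l = 4),
      flag_all_any _ (fun l => l = 5)]
  have hlast : (if (mes.map PySem.Str.len).all (fun l => decide (1 ≤ l ∧ l ≤ 5)) then (0 : Int) else 1) =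
      (if (mes.map PySem.Str.len).any (fun l => decide (¬ (1 ≤ l ∧ l ≤ 5))) then (1 : Int) else 0) := by
    have := flag_all_any (mes.map PySem.Str.len) (fun l => ¬ (1 ≤ l ∧ l ≤ 5))
    simpa using this
  rw [hlast]
  rfl
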